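-- pv_equiv track=rewrite | github.com/SooOverpowered/AOC | 2021/10.py | part1
-- ===== SOURCE A (Python) =====
-- def part1(data):
--     lines = list(map(list, data.split('\n')))
--     brackets = {'<': '>', '[': ']', '{': '}', '(': ')'}
--     illegal_score = {')': 3, ']': 57, '}': 1197, '>': 25137}
--     score = 0
--     for line in lines:
--         stack = []
--         for bracket in line:
--             if bracket in brackets.keys():
--                 stack.append(bracket)
--             elif bracket in brackets.values() and len(stack) > 0:
--                 if brackets[stack[-1]] == bracket:
--                     stack.pop()
--                 else:
--                     score += illegal_score[bracket]
--                     break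
--             else:
--                 score += illegal_score[bracket]
--                 break
--     return score
-- ===== SOURCE B (Python) =====
-- def part1(data):
--     score = 0
--     for line in data.split('\n'):
--         while True:
--             reduced = line.replace('()', '').replace('[]', '').replace('{}', '').replace('<>', '')
--             if reduced == line:
--                 break
--             line = reduced
--         for c in line:
--             if c in ')]}>':
--                 score += {')': 3, ']': 57, '}': 1197, '>': 25137}[c]
--                 break
--     return score
-- ===== Notes on version B (the rewrite author's own statement) =====
-- stated objective: simpler
-- what changed: A simulates each line with an explicit stack and an early break; B instead rewrites each line to a normal form by repeatedly deleting every matched adjacent opener-closer pair via str.replace and then scores the first surviving closing bracket.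
-- outside the precondition, e.g. on part1('(]a'): A returns 57, B returns 57
import Mathlib
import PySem

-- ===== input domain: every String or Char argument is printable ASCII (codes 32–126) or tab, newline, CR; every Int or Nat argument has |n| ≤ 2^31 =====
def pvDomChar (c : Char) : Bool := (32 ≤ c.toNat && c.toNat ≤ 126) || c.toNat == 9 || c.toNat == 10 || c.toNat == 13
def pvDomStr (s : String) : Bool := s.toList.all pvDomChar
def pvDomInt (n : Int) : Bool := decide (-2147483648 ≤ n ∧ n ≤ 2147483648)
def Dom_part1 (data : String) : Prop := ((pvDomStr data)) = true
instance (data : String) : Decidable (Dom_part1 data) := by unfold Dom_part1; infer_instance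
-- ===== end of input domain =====

-- B replaces A's stack scan per line by a reduce-to-normal-form rewrite: repeatedly delete
-- matched adjacent pairs, then score the first surviving closing bracket (objective: simpler).

-- ===== PORT A =====
def pvBrkA : PySem.Dict Char Char := PySem.Dict.ofList [('<','>'), ('[',']'), ('{','}'), ('(',')')]
def pvIllA : PySem.Dict Char Int := PySem.Dict.ofList [(')',3), (']',57), ('}',1197), ('>',25137)]

-- A's inner loop over one line; Python's list `stack` (append/pop/peek at the right end)
-- is represented head-first: head = stack[-1].
def pvLineA : List Char → List Char → Int
  | [], _ => 0
  | c :: rest, stack =>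
    if (PySem.Dict.keys pvBrkA).contains c then
      pvLineA rest (c :: stack)
    else if (PySem.Dict.values pvBrkA).contains c && !stack.isEmpty then
      match stack with
      | top :: stk =>
        if PySem.Dict.get? pvBrkA top == some c then pvLineA rest stk
        else (PySem.Dict.get? pvIllA c).getD 0   -- score += illegal_score[bracket]; break
      | [] => (PySem.Dict.get? pvIllA c).getD 0  -- unreachable: the guard checked stack ≠ []
    else (PySem.Dict.get? pvIllA c).getD 0
      -- illegal_score[bracket]: KeyError (none) when c is not a closer; Pre_part1 excludes that

def part1 (data : String) : Int :=
  -- data.split('\n') with a nonempty separator is Chars.splitOn; list(line) = List Char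
  (PySem.Chars.splitOn data.toList ['\n']).foldl (fun score line => score + pvLineA line []) 0

-- ===== PORT B =====
-- B-side helpers: characterisation of str.replace(two-char pattern, '') used by the
-- termination argument of pvReduce (cited by name in decreasing_by).
def pvRed2 (a b : Char) : List Char → List Char
  | x :: y :: t => if x = a ∧ y = b then pvRed2 a b t else x :: pvRed2 a b (y :: t)
  | l => l

theorem pvReplace_go_eq (a b : Char) : ∀ fuel l acc, l.length ≤ fuel →
    PySem.Chars.replace.go [a, b] [] fuel l acc = acc.reverse ++ pvRed2 a b l := by
  intro fuel
  induction fuel with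
  | zero =>
    intro l acc h
    have : l = [] := List.eq_nil_of_length_eq_zero (Nat.le_zero.mp h)
    subst this
    simp [PySem.Chars.replace.go, pvRed2]
  | succ n ih =>
    intro l acc h
    match l with
    | [] => simp [PySem.Chars.replace.go, pvRed2]
    | [c] =>
      simp [PySem.Chars.replace.go, List.isPrefixOf, pvRed2]
      rw [ih [] (c :: acc) (by simp)]
      simp [pvRed2]
    | c :: d :: u =>
      by_cases hp : c = a ∧ d = b
      · obtain ⟨rfl, rfl⟩ := hp
        rw [show PySem.Chars.replace.go [c,d] [] (n+1) (c::d::u) acc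
              = PySem.Chars.replace.go [c,d] [] n u acc by
          simp [PySem.Chars.replace.go, List.isPrefixOf]]
        rw [ih u acc (by simp at h; omega)]
        simp [pvRed2]
      · have hpb : List.isPrefixOf [a,b] (c::d::u) = false := by
          simp [List.isPrefixOf]
          intro hc; exact fun hd => hp ⟨hc.symm ▸ rfl, hd.symm ▸ rfl⟩
        rw [show PySem.Chars.replace.go [a,b] [] (n+1) (c::d::u) acc
              = PySem.Chars.replace.go [a,b] [] n (d::u) (c::acc) by
          simp [PySem.Chars.replace.go, hpb]]
        rw [ih (d::u) (c::acc) (by simp at h ⊢; omega)]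
        simp [pvRed2, hp]

theorem pvReplace_eq (a b : Char) (l : List Char) :
    PySem.Chars.replace l [a, b] [] = pvRed2 a b l := by
  have := pvReplace_go_eq a b l.length l [] le_rfl
  simpa [PySem.Chars.replace] using this

theorem pvRed2_length_le (a b : Char) : ∀ l, (pvRed2 a b l).length ≤ l.length := by
  intro l
  induction l using pvRed2.induct a b with
  | case1 x y t h ih => simp [pvRed2, h]; omega
  | case2 x y t h ih => simp [pvRed2, h]; simpa using ih
  | case3 l h => cases l with
    | nil => simp [pvRed2]
    | cons x t => cases t with
      | nil => simp [pvRed2]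
      | cons y u => exact absurd rfl (h x y u)

theorem pvRed2_eq_of_length (a b : Char) :
    ∀ l, (pvRed2 a b l).length = l.length → pvRed2 a b l = l := by
  intro l
  induction l using pvRed2.induct a b with
  | case1 x y t h ih =>
    intro hl
    exfalso
    have := pvRed2_length_le a b t
    simp [pvRed2, h] at hl
    omega
  | case2 x y t h ih =>
    intro hl
    simp [pvRed2, h] at hl ⊢
    exact ih hl
  | case3 l h =>
    intro _
    cases l with
    | nil => simp [pvRed2]
    | cons x t => cases t with
      | nil => simp [pvRed2]
      | cons y u => exact absurd rfl (h x y u)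

-- one pass of the while-loop body: the four str.replace calls deleting matched adjacent pairs
def pvStep (l : List Char) : List Char :=
  PySem.Chars.replace (PySem.Chars.replace (PySem.Chars.replace
    (PySem.Chars.replace l ['(',')'] []) ['[',']'] []) ['{','}'] []) ['<','>'] []

theorem pvStep_length_lt (l : List Char) (h : ¬ pvStep l = l) : (pvStep l).length < l.length := by
  by_contra hlt
  apply h
  unfold pvStep at *
  rw [pvReplace_eq, pvReplace_eq, pvReplace_eq, pvReplace_eq] at *
  set r1 := pvRed2 '(' ')' l with hr1
  set r2 := pvRed2 '[' ']' r1 with hr2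
  set r3 := pvRed2 '{' '}' r2 with hr3
  have h1 := pvRed2_length_le '(' ')' l
  have h2 := pvRed2_length_le '[' ']' r1
  have h3 := pvRed2_length_le '{' '}' r2
  have h4 := pvRed2_length_le '<' '>' r3
  rw [← hr1] at h1; rw [← hr2] at h2; rw [← hr3] at h3
  have e4 : pvRed2 '<' '>' r3 = r3 := pvRed2_eq_of_length _ _ _ (by omega)
  rw [e4]
  have e3 : r3 = r2 := by rw [hr3]; exact pvRed2_eq_of_length _ _ _ (by rw [← hr3]; omega)
  have e2 : r2 = r1 := by rw [hr2]; exact pvRed2_eq_of_length _ _ _ (by rw [← hr2]; omega)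
  have e1 : r1 = l := by rw [hr1]; exact pvRed2_eq_of_length _ _ _ (by rw [← hr1]; omega)
  rw [e3, e2, e1]

-- while True: reduced = step(line); if reduced == line: break; line = reduced
def pvReduce (l : List Char) : List Char :=
  if h : pvStep l = l then l else pvReduce (pvStep l)
termination_by l.length
decreasing_by exact pvStep_length_lt l h

def pvIllB : PySem.Dict Char Int := PySem.Dict.ofList [(')',3), (']',57), ('}',1197), ('>',25137)]

-- for c in line: if c in ')]}>': … break   (membership of a single char = list membership)
def pvFirstClose : List Char → Int
  | [] => 0
  | c :: rest =>
    if [')', ']', '}', '>'].contains c then (PySem.Dict.get? pvIllB c).getD 0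
    else pvFirstClose rest

def part1_alt (data : String) : Int :=
  (PySem.Chars.splitOn data.toList ['\n']).foldl
    (fun score line => score + pvFirstClose (pvReduce line)) 0

-- ===== PRECONDITION & SPEC =====
-- Pre_ admits inputs whose every line is either bracket-only or begins with a closing
-- bracket (A then scores the line at its first character without reading the rest).
-- It excludes the remaining inputs with stray characters: A raises KeyError the moment its
-- scan reaches one; on the lines where a corruption break happens to precede the stray
-- character A still returns (and B agrees), but that set is not closed-form.
def Pre_part1 (data : String) : Prop :=
  (PySem.Chars.splitOn data.toList ['\n']).all (fun line =>
    line.all (fun c => c ∈ ['(', ')', '[', ']', '{', '}', '<', '>']) ||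
    (line.head?.elim false (fun c => [')', ']', '}', '>'].contains c))) = true
instance (data : String) : Decidable (Pre_part1 data) := by unfold Pre_part1; infer_instance

def pvWitness_part1 : String := "([)]\n<{}>(\n)ab]"

def Spec_part1 (data : String) (out : Int) : Prop := out = part1_alt data
instance (data : String) (out : Int) : Decidable (Spec_part1 data out) := by unfold Spec_part1; infer_instance

-- ===== CLAIM (what is proved, stated in full; the proofs are below) =====
def Claim_equal_part1 : Prop := ∀ (data : String), Dom_part1 data → Pre_part1 data → Spec_part1 data (part1 data)

-- ===== LEMMAS AND PROOFS =====

-- no adjacent occurrence of the pair a,b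
def pvNA (a b : Char) : List Char → Prop
  | x :: y :: t => ¬(x = a ∧ y = b) ∧ pvNA a b (y :: t)
  | _ => True

theorem pvNA_tail (a b x : Char) (r : List Char) (h : pvNA a b (x :: r)) : pvNA a b r := by
  cases r with
  | nil => trivial
  | cons y t => exact h.2

theorem pvRed2_fix_NA (a b : Char) : ∀ l, pvRed2 a b l = l → pvNA a b l := by
  intro l
  induction l using pvRed2.induct a b with
  | case1 x y t h ih =>
    intro hl
    exfalso
    have h1 := pvRed2_length_le a b t
    have : (pvRed2 a b (x :: y :: t)).length = (x::y::t).length := by rw [hl]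
    simp [pvRed2, h] at this
    omega
  | case2 x y t h ih =>
    intro hl
    simp [pvRed2, h] at hl
    exact ⟨h, ih hl⟩
  | case3 l h =>
    intro _
    cases l with
    | nil => trivial
    | cons x t => cases t with
      | nil => trivial
      | cons y u => exact absurd rfl (h x y u)

theorem pvRed2_sublist (a b : Char) : ∀ l, (pvRed2 a b l).Sublist l := by
  intro l
  induction l using pvRed2.induct a b with
  | case1 x y t h ih =>
    obtain ⟨rfl, rfl⟩ := h
    simp only [pvRed2, and_self, if_pos]
    refine ih.trans ?_
    refine List.Sublist.trans ?_ (List.sublist_cons_self _ _)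
    exact List.sublist_cons_self _ _
  | case2 x y t h ih =>
    simp only [pvRed2, h, if_neg]
    exact ih.cons₂ x
  | case3 l h =>
    cases l with
    | nil => simp [pvRed2]
    | cons x t => cases t with
      | nil => simp [pvRed2]
      | cons y u => exact absurd rfl (h x y u)

theorem pvLineA_cons_congr (c : Char) (u v : List Char)
    (h : ∀ stk, pvLineA u stk = pvLineA v stk) (stk : List Char) :
    pvLineA (c :: u) stk = pvLineA (c :: v) stk := by
  cases stk with
  | nil =>
    simp only [pvLineA]
    split_ifs <;> first | rfl | apply h
  | cons top stk =>
    simp only [pvLineA]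
    split_ifs <;> first | rfl | apply h

theorem pvLineA_red2 (a b : Char)
    (hk : (PySem.Dict.keys pvBrkA).contains a = true)
    (hv : (PySem.Dict.values pvBrkA).contains b = true)
    (hkb : (PySem.Dict.keys pvBrkA).contains b = false)
    (hg : (PySem.Dict.get? pvBrkA a == some b) = true) :
    ∀ l stk, pvLineA (pvRed2 a b l) stk = pvLineA l stk := by
  intro l
  induction l using pvRed2.induct a b with
  | case1 x y t h ih =>
    intro stk
    obtain ⟨rfl, rfl⟩ := h
    have hrhs : pvLineA (x :: y :: t) stk = pvLineA t stk := by
      simp only [pvLineA, hk, hv, hkb, hg, List.isEmpty_cons, Bool.not_false, Bool.and_true,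
        if_true, if_false, ite_true, ite_false, Bool.false_eq_true]
    rw [hrhs]
    simp only [pvRed2, and_self, ite_true]
    exact ih stk
  | case2 x y t h ih =>
    intro stk
    simp only [pvRed2, h, if_neg, ite_false]
    exact pvLineA_cons_congr x _ _ ih stk
  | case3 l h =>
    intro stk
    cases l with
    | nil => rfl
    | cons x t => cases t with
      | nil => rfl
      | cons y u => exact absurd rfl (h x y u)

theorem pvLineA_step (l stk : List Char) : pvLineA (pvStep l) stk = pvLineA l stk := by
  unfold pvStep
  rw [pvReplace_eq, pvReplace_eq, pvReplace_eq, pvReplace_eq]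
  rw [pvLineA_red2 '<' '>' (by decide) (by decide) (by decide) (by decide)]
  rw [pvLineA_red2 '{' '}' (by decide) (by decide) (by decide) (by decide)]
  rw [pvLineA_red2 '[' ']' (by decide) (by decide) (by decide) (by decide)]
  rw [pvLineA_red2 '(' ')' (by decide) (by decide) (by decide) (by decide)]

theorem pvLineA_reduce (l stk : List Char) : pvLineA (pvReduce l) stk = pvLineA l stk := by
  induction l using pvReduce.induct with
  | case1 l h => rw [pvReduce, dif_pos h]
  | case2 l h ih => rw [pvReduce, dif_neg h, ih, pvLineA_step]

theorem pvReduce_fix (l : List Char) : pvStep (pvReduce l) = pvReduce l := by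
  induction l using pvReduce.induct with
  | case1 l h => rw [pvReduce, dif_pos h]; exact h
  | case2 l h ih => rw [pvReduce, dif_neg h]; exact ih

theorem pvStep_sublist (l : List Char) : (pvStep l).Sublist l := by
  unfold pvStep
  rw [pvReplace_eq, pvReplace_eq, pvReplace_eq, pvReplace_eq]
  exact ((pvRed2_sublist _ _ _).trans ((pvRed2_sublist _ _ _).trans
    ((pvRed2_sublist _ _ _).trans (pvRed2_sublist _ _ _))))

theorem pvReduce_sublist (l : List Char) : (pvReduce l).Sublist l := by
  induction l using pvReduce.induct with
  | case1 l h => rw [pvReduce, dif_pos h]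
  | case2 l h ih => rw [pvReduce, dif_neg h]; exact ih.trans (pvStep_sublist l)

def pvNA4 (l : List Char) : Prop :=
  pvNA '(' ')' l ∧ pvNA '[' ']' l ∧ pvNA '{' '}' l ∧ pvNA '<' '>' l

theorem pvFix_NA4 (l : List Char) (h : pvStep l = l) : pvNA4 l := by
  have h' := h
  unfold pvStep at h'
  rw [pvReplace_eq, pvReplace_eq, pvReplace_eq, pvReplace_eq] at h'
  have h1 := pvRed2_length_le '(' ')' l
  have h2 := pvRed2_length_le '[' ']' (pvRed2 '(' ')' l)
  have h3 := pvRed2_length_le '{' '}' (pvRed2 '[' ']' (pvRed2 '(' ')' l))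
  have h4 := pvRed2_length_le '<' '>' (pvRed2 '{' '}' (pvRed2 '[' ']' (pvRed2 '(' ')' l)))
  have hlen : l.length = (pvRed2 '<' '>' (pvRed2 '{' '}' (pvRed2 '[' ']' (pvRed2 '(' ')' l)))).length := by
    rw [h']
  have e1 : pvRed2 '(' ')' l = l := pvRed2_eq_of_length _ _ _ (by omega)
  rw [e1] at h' h2 h3 h4 hlen
  have e2 : pvRed2 '[' ']' l = l := pvRed2_eq_of_length _ _ _ (by omega)
  rw [e2] at h' h3 h4 hlen
  have e3 : pvRed2 '{' '}' l = l := pvRed2_eq_of_length _ _ _ (by omega)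
  rw [e3] at h' h4 hlen
  exact ⟨pvRed2_fix_NA _ _ _ e1, pvRed2_fix_NA _ _ _ e2, pvRed2_fix_NA _ _ _ e3,
    pvRed2_fix_NA _ _ _ h'⟩

theorem pvOpenCase (c p : Char) (rest stk : List Char)
    (hk : (PySem.Dict.keys pvBrkA).contains c = true)
    (hcl : ([')', ']', '}', '>'].contains c) = false)
    (hg : PySem.Dict.get? pvBrkA c = some p)
    (hna1 : pvNA c p (c :: rest))
    (hrec : ∀ stk, (∀ t stk' d r2, stk = t :: stk' → rest = d :: r2 →
        ¬ PySem.Dict.get? pvBrkA t = some d) → pvLineA rest stk = pvFirstClose rest) :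
    pvLineA (c :: rest) stk = pvFirstClose (c :: rest) := by
  have l1 : pvLineA (c :: rest) stk = pvLineA rest (c :: stk) := by
    cases stk <;> simp only [pvLineA, hk, if_true]
  have l2 : pvFirstClose (c :: rest) = pvFirstClose rest := by
    simp only [pvFirstClose, hcl, Bool.false_eq_true, if_false]
  rw [l1, l2]
  apply hrec
  intro t stk' d r2 hstkEq hlEq
  obtain ⟨rfl, rfl⟩ : c = t ∧ stk = stk' := ⟨(List.cons.inj hstkEq).1, (List.cons.inj hstkEq).2⟩
  subst hlEq
  intro hgd
  rw [hg] at hgd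
  exact hna1.1 ⟨rfl, (Option.some.inj hgd).symm⟩

theorem pvCloseCase (c : Char) (rest stk : List Char)
    (hk : (PySem.Dict.keys pvBrkA).contains c = false)
    (hv : (PySem.Dict.values pvBrkA).contains c = true)
    (hcl : ([')', ']', '}', '>'].contains c) = true)
    (hill : (PySem.Dict.get? pvIllA c).getD 0 = (PySem.Dict.get? pvIllB c).getD 0)
    (hstk : ∀ t stk', stk = t :: stk' → ¬ PySem.Dict.get? pvBrkA t = some c) :
    pvLineA (c :: rest) stk = pvFirstClose (c :: rest) := by
  have l2 : pvFirstClose (c :: rest) = (PySem.Dict.get? pvIllB c).getD 0 := by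
    simp only [pvFirstClose, hcl, if_true]
  rw [l2, ← hill]
  cases stk with
  | nil =>
    simp only [pvLineA, hk, Bool.false_eq_true, if_false, List.isEmpty_nil, Bool.not_true,
      Bool.and_false, ite_false]
  | cons top stk' =>
    have hne := hstk top stk' rfl
    have hbeq : (PySem.Dict.get? pvBrkA top == some c) = false := by
      simpa using hne
    simp only [pvLineA, hk, Bool.false_eq_true, if_false, hv, List.isEmpty_cons, Bool.not_false,
      Bool.and_true, if_true, hbeq, ite_false]

theorem pvNA4_tail (x : Char) (r : List Char) (h : pvNA4 (x :: r)) : pvNA4 r :=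
  ⟨pvNA_tail _ _ _ _ h.1, pvNA_tail _ _ _ _ h.2.1, pvNA_tail _ _ _ _ h.2.2.1,
   pvNA_tail _ _ _ _ h.2.2.2⟩

theorem pvLineA_fixpoint : ∀ l stk,
    (∀ c ∈ l, c ∈ ['(', ')', '[', ']', '{', '}', '<', '>']) → pvNA4 l →
    (∀ t stk' c rest, stk = t :: stk' → l = c :: rest → ¬ PySem.Dict.get? pvBrkA t = some c) →
    pvLineA l stk = pvFirstClose l := by
  intro l
  induction l with
  | nil => intro stk _ _ _; rfl
  | cons c rest ih =>
    intro stk hall hna hstk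
    have hrec : ∀ stk, (∀ t stk' d r2, stk = t :: stk' → rest = d :: r2 →
        ¬ PySem.Dict.get? pvBrkA t = some d) → pvLineA rest stk = pvFirstClose rest :=
      fun stk hh => ih stk (fun x hx => hall x (List.mem_cons_of_mem c hx)) (pvNA4_tail c rest hna) hh
    have hstk' : ∀ t stk', stk = t :: stk' → ¬ PySem.Dict.get? pvBrkA t = some c :=
      fun t stk' he => hstk t stk' c rest he rfl
    have hc : c ∈ ['(', ')', '[', ']', '{', '}', '<', '>'] := hall c List.mem_cons_self
    simp only [List.mem_cons, List.mem_singleton, List.not_mem_nil, or_false] at hc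
    rcases hc with rfl | rfl | rfl | rfl | rfl | rfl | rfl | rfl
    · exact pvOpenCase _ ')' rest stk (by decide) (by decide) (by decide) hna.1 hrec
    · exact pvCloseCase _ rest stk (by decide) (by decide) (by decide) (by decide) hstk'
    · exact pvOpenCase _ ']' rest stk (by decide) (by decide) (by decide) hna.2.1 hrec
    · exact pvCloseCase _ rest stk (by decide) (by decide) (by decide) (by decide) hstk'
    · exact pvOpenCase _ '}' rest stk (by decide) (by decide) (by decide) hna.2.2.1 hrec
    · exact pvCloseCase _ rest stk (by decide) (by decide) (by decide) (by decide) hstk'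
    · exact pvOpenCase _ '>' rest stk (by decide) (by decide) (by decide) hna.2.2.2 hrec
    · exact pvCloseCase _ rest stk (by decide) (by decide) (by decide) (by decide) hstk'

theorem pvLine_eq (l : List Char) (hb : ∀ c ∈ l, c ∈ ['(', ')', '[', ']', '{', '}', '<', '>']) :
    pvLineA l [] = pvFirstClose (pvReduce l) := by
  rw [← pvLineA_reduce l []]
  refine pvLineA_fixpoint (pvReduce l) [] ?_ ?_ ?_
  · exact fun c hc => hb c ((pvReduce_sublist l).subset hc)
  · exact pvFix_NA4 _ (pvReduce_fix l)
  · intro t stk' c rest he _; cases he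

theorem pvRed2_head (a b x : Char) (hx : ¬ x = a) (t : List Char) :
    pvRed2 a b (x :: t) = x :: pvRed2 a b t := by
  cases t with
  | nil => rfl
  | cons y u => simp only [pvRed2, hx, false_and, if_neg, ite_false, not_false_iff]

theorem pvStep_cons (x : Char) (h1 : ¬ x = '(') (h2 : ¬ x = '[') (h3 : ¬ x = '{')
    (h4 : ¬ x = '<') (t : List Char) : pvStep (x :: t) = x :: pvStep t := by
  unfold pvStep
  rw [pvReplace_eq, pvReplace_eq, pvReplace_eq, pvReplace_eq,
      pvReplace_eq, pvReplace_eq, pvReplace_eq, pvReplace_eq,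
      pvRed2_head _ _ _ h1, pvRed2_head _ _ _ h2, pvRed2_head _ _ _ h3, pvRed2_head _ _ _ h4]

theorem pvReduce_cons (x : Char) (h1 : ¬ x = '(') (h2 : ¬ x = '[') (h3 : ¬ x = '{')
    (h4 : ¬ x = '<') (t : List Char) : pvReduce (x :: t) = x :: pvReduce t := by
  induction t using pvReduce.induct with
  | case1 t h =>
    rw [pvReduce, dif_pos (show pvStep (x :: t) = x :: t by rw [pvStep_cons x h1 h2 h3 h4, h])]
    conv_rhs => rw [pvReduce, dif_pos h]
  | case2 t h ih =>
    have hne : ¬ pvStep (x :: t) = x :: t := by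
      rw [pvStep_cons x h1 h2 h3 h4]
      intro hh
      exact h (List.cons.inj hh).2
    rw [pvReduce, dif_neg hne, pvStep_cons x h1 h2 h3 h4, ih]
    conv_rhs => rw [pvReduce, dif_neg h]

theorem pvFirstClose_cons_close (c : Char) (hc : ([')', ']', '}', '>'].contains c) = true)
    (r : List Char) : pvFirstClose (c :: r) = (PySem.Dict.get? pvIllB c).getD 0 := by
  simp only [pvFirstClose, hc, if_true]

theorem pvHeadClose_eq (c : Char) (rest : List Char)
    (hc : ([')', ']', '}', '>'].contains c) = true) :
    pvLineA (c :: rest) [] = pvFirstClose (pvReduce (c :: rest)) := by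
  have hmem : c = ')' ∨ c = ']' ∨ c = '}' ∨ c = '>' := by
    simpa using hc
  have hstk : ∀ t stk', ([] : List Char) = t :: stk' → ¬ PySem.Dict.get? pvBrkA t = some c := by
    intro t stk' he; cases he
  rcases hmem with rfl | rfl | rfl | rfl <;>
    rw [pvReduce_cons _ (by decide) (by decide) (by decide) (by decide),
        pvFirstClose_cons_close _ (by decide),
        ← pvFirstClose_cons_close _ (by decide) rest] <;>
    exact pvCloseCase _ rest [] (by decide) (by decide) (by decide) (by decide) hstk

-- ===== VERDICT (by name: the statement is the Claim_ definition above) =====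
theorem part1_spec : Claim_equal_part1 := by
  intro data _ hpre
  unfold Spec_part1 part1 part1_alt
  refine PySem.List.foldl_congr_mem _ _ _ _ ?_
  intro acc line hline
  unfold Pre_part1 at hpre
  rw [List.all_eq_true] at hpre
  have hl := hpre line hline
  rw [Bool.or_eq_true] at hl
  rcases hl with hb | hcl
  · rw [pvLine_eq line (by simpa [List.all_eq_true] using hb)]
  · cases line with
    | nil => simp at hcl
    | cons c rest =>
      simp only [Option.elim, List.head?] at hcl
      rw [pvHeadClose_eq c rest hcl]
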